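-- pv_equiv track=rewrite | github.com/ElderMedic/FAIRiAgent | fairifier/services/fairds_api_parser.py | get_fields_by_sheet_and_requirement
-- ===== SOURCE A (Python) =====
-- from typing import Dict, List, Any, Optional
--
-- def get_fields_by_sheet_and_requirement(
--     fields: List[Dict[str, Any]]
-- ) -> Dict[str, Dict[str, List[Dict[str, Any]]]]:
--     """
--     将字段按 ISA sheet 和 requirement level 分组
--
--     Returns:
--         {
--             "Investigation": {"mandatory": [...], "optional": [...]},
--             "Study": {"mandatory": [...], "optional": [...]},
--             ...
--         }
--     """
--     result: Dict[str, Dict[str, List[Dict[str, Any]]]] = {}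
--
--     for field in fields:
--         sheet = field.get("sheetName", "Unknown")
--         req = field.get("requirement", "OPTIONAL").upper()
--
--         if sheet not in result:
--             result[sheet] = {"mandatory": [], "recommended": [], "optional": []}
--
--         if req == "MANDATORY":
--             result[sheet]["mandatory"].append(field)
--         elif req == "RECOMMENDED":
--             result[sheet]["recommended"].append(field)
--         else:
--             result[sheet]["optional"].append(field)
--
--     return result
-- ===== SOURCE B (Python) =====
-- from typing import Dict, List, Any
--
--
-- def get_fields_by_sheet_and_requirement(
--     fields: List[Dict[str, Any]]
-- ) -> Dict[str, Dict[str, List[Dict[str, Any]]]]: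
--     def sheet_of(f):
--         return f.get("sheetName", "Unknown")
--
--     def req_of(f):
--         return f.get("requirement", "OPTIONAL").upper()
--
--     sheets = list(dict.fromkeys(sheet_of(f) for f in fields))
--     return {
--         s: {
--             "mandatory": [f for f in fields
--                           if sheet_of(f) == s and req_of(f) == "MANDATORY"],
--             "recommended": [f for f in fields
--                             if sheet_of(f) == s and req_of(f) == "RECOMMENDED"],
--             "optional": [f for f in fields
--                          if sheet_of(f) == s
--                          and not (req_of(f) == "MANDATORY" or req_of(f) == "RECOMMENDED")],
--         }
--         for s in sheets
--     }
-- ===== Notes on version B (the rewrite author's own statement) =====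
-- stated objective: alternative
-- what changed: Replaces the one-pass mutable bucketing loop by a declarative two-phase construction: first an ordered dedup of sheet names (dict.fromkeys), then a dict comprehension that builds each sheet's three buckets by filtering the field list per requirement level.
import Mathlib
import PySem

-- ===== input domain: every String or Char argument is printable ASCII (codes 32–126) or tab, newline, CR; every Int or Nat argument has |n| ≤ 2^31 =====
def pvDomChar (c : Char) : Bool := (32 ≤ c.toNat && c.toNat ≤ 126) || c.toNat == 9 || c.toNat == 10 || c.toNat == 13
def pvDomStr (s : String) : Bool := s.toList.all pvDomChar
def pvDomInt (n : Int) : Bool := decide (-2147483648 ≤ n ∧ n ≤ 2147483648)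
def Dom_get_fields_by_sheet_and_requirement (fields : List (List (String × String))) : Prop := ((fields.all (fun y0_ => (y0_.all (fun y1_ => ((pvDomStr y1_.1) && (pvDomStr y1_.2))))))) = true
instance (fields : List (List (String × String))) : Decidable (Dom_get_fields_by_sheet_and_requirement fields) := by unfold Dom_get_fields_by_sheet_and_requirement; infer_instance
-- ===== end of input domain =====

-- ===== PORT A =====
-- B replaces A's one-pass mutable bucketing by dedup-of-sheets + per-sheet filter comprehensions (alternative structure, not faster).
def pvSheet (f : List (String × String)) : String :=
  (PySem.Dict.mk f).getD "sheetName" "Unknown"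

def pvReq (f : List (String × String)) : String :=
  PySem.Str.upper ((PySem.Dict.mk f).getD "requirement" "OPTIONAL")

def pvD0 : PySem.Dict String (List (List (String × String))) :=
  PySem.Dict.ofList [("mandatory", []), ("recommended", []), ("optional", [])]

def pvStepA (result : PySem.Dict String (PySem.Dict String (List (List (String × String)))))
    (field : List (String × String)) :
    PySem.Dict String (PySem.Dict String (List (List (String × String)))) :=
  let sheet := pvSheet field
  let req := pvReq field
  let result := if result.contains sheet then result else result.insert sheet pvD0
  if req == "MANDATORY" then
    result.modify sheet pvD0 (fun inner => inner.modify "mandatory" [] (· ++ [field]))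
  else if req == "RECOMMENDED" then
    result.modify sheet pvD0 (fun inner => inner.modify "recommended" [] (· ++ [field]))
  else
    result.modify sheet pvD0 (fun inner => inner.modify "optional" [] (· ++ [field]))

def get_fields_by_sheet_and_requirement (fields : List (List (String × String))) :
    List (String × List (String × List (List (String × String)))) :=
  ((fields.foldl pvStepA PySem.Dict.empty).items).map (fun p => (p.1, p.2.items))

-- ===== PORT B =====
def get_fields_by_sheet_and_requirement_alt (fields : List (List (String × String))) :
    List (String × List (String × List (List (String × String)))) :=
  let sheets := PySem.List.dedup (fields.map pvSheet)
  sheets.map (fun s =>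
    (s, [("mandatory", fields.filter (fun f => pvSheet f == s && pvReq f == "MANDATORY")),
         ("recommended", fields.filter (fun f => pvSheet f == s && pvReq f == "RECOMMENDED")),
         ("optional", fields.filter (fun f =>
            pvSheet f == s && !(pvReq f == "MANDATORY" || pvReq f == "RECOMMENDED")))]))

-- ===== PRECONDITION & SPEC =====
def Spec_get_fields_by_sheet_and_requirement (fields : List (List (String × String))) (out : List (String × List (String × List (List (String × String))))) : Prop := out = get_fields_by_sheet_and_requirement_alt fields
instance (fields : List (List (String × String))) (out : List (String × List (String × List (List (String × String))))) : Decidable (Spec_get_fields_by_sheet_and_requirement fields out) := by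
  unfold Spec_get_fields_by_sheet_and_requirement
  have d5 : DecidableEq (List (String × List (List (String × String)))) := inferInstance
  haveI := d5
  have d6 : DecidableEq (String × List (String × List (List (String × String)))) := inferInstance
  haveI := d6
  have d7 : DecidableEq (List (String × List (String × List (List (String × String))))) := inferInstance
  exact d7 out (get_fields_by_sheet_and_requirement_alt fields)

-- ===== CLAIM (what is proved, stated in full; the proofs are below) =====
def Claim_equal_get_fields_by_sheet_and_requirement : Prop := ∀ (fields : List (List (String × String))), Dom_get_fields_by_sheet_and_requirement fields → Spec_get_fields_by_sheet_and_requirement fields (get_fields_by_sheet_and_requirement fields)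

-- ===== LEMMAS AND PROOFS =====

-- the inner dict A keeps for sheet s, characterised by B's filters
def pvInner (fields : List (List (String × String))) (s : String) :
    PySem.Dict String (List (List (String × String))) :=
  PySem.Dict.mk
    [("mandatory", fields.filter (fun f => pvSheet f == s && pvReq f == "MANDATORY")),
     ("recommended", fields.filter (fun f => pvSheet f == s && pvReq f == "RECOMMENDED")),
     ("optional", fields.filter (fun f =>
        pvSheet f == s && !(pvReq f == "MANDATORY" || pvReq f == "RECOMMENDED")))]

lemma pvInner_of_ne (fields : List (List (String × String))) (f : List (String × String))
    (s : String) (h : pvSheet f ≠ s) :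
    pvInner (fields ++ [f]) s = pvInner fields s := by
  simp [pvInner, List.filter_append, h]

lemma pvInner_empty (fields : List (List (String × String))) (s : String)
    (h : s ∉ fields.map pvSheet) : pvInner fields s = pvD0 := by
  have hf : ∀ (p : List (String × String) → Bool),
      fields.filter (fun f => pvSheet f == s && p f) = [] := by
    intro p
    rw [List.filter_eq_nil_iff]
    intro f hfmem
    have : pvSheet f ≠ s := fun hh => h (hh ▸ List.mem_map_of_mem hfmem)
    simp [this]
  unfold pvInner pvD0
  rw [hf (fun f => pvReq f == "MANDATORY"), hf (fun f => pvReq f == "RECOMMENDED"),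
      hf (fun f => !(pvReq f == "MANDATORY" || pvReq f == "RECOMMENDED"))]
  decide

lemma pvInner_mand (fields : List (List (String × String))) (f : List (String × String))
    (h : pvReq f = "MANDATORY") :
    (pvInner fields (pvSheet f)).modify "mandatory" [] (· ++ [f])
      = pvInner (fields ++ [f]) (pvSheet f) := by
  apply PySem.Dict.ext
  simp [pvInner, PySem.Dict.modify, PySem.Dict.getD, PySem.Dict.get?, PySem.Dict.insert,
        List.filter_append, h]

lemma pvInner_rec (fields : List (List (String × String))) (f : List (String × String))
    (h : pvReq f = "RECOMMENDED") :
    (pvInner fields (pvSheet f)).modify "recommended" [] (· ++ [f])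
      = pvInner (fields ++ [f]) (pvSheet f) := by
  apply PySem.Dict.ext
  simp [pvInner, PySem.Dict.modify, PySem.Dict.getD, PySem.Dict.get?, PySem.Dict.insert,
        List.filter_append, h]

lemma pvInner_opt (fields : List (List (String × String))) (f : List (String × String))
    (h1 : pvReq f ≠ "MANDATORY") (h2 : pvReq f ≠ "RECOMMENDED") :
    (pvInner fields (pvSheet f)).modify "optional" [] (· ++ [f])
      = pvInner (fields ++ [f]) (pvSheet f) := by
  apply PySem.Dict.ext
  simp [pvInner, PySem.Dict.modify, PySem.Dict.getD, PySem.Dict.get?, PySem.Dict.insert,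
        List.filter_append, h1, h2]

lemma pvMain (fields : List (List (String × String))) :
    (fields.foldl pvStepA PySem.Dict.empty).items
      = (PySem.List.dedup (fields.map pvSheet)).map (fun s => (s, pvInner fields s)) := by
  induction fields using List.reverseRecOn with
  | nil => decide
  | append_singleton fields f IH =>
    have hded : PySem.List.dedup ((fields ++ [f]).map pvSheet)
        = PySem.Set.add (PySem.List.dedup (fields.map pvSheet)) (pvSheet f) := by
      simp [PySem.List.dedup, PySem.Set.ofList_eq_foldl, List.foldl_append]
    set R := fields.foldl pvStepA PySem.Dict.empty with hR
    have hkeys : R.keys = PySem.List.dedup (fields.map pvSheet) := by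
      show R.items.map (·.1) = _
      rw [IH, List.map_map]
      exact List.map_id _
    have hnd : R.keys.Nodup := by rw [hkeys]; exact PySem.Set.nodup_ofList _
    have hfoldl : (fields ++ [f]).foldl pvStepA PySem.Dict.empty = pvStepA R f := by
      rw [List.foldl_append]; rfl
    rw [hfoldl]
    by_cases hmem : pvSheet f ∈ fields.map pvSheet
    · -- sheet already present: dedup unchanged, entry at pvSheet f updated in place
      have hmemd : pvSheet f ∈ PySem.List.dedup (fields.map pvSheet) := by
        simpa [PySem.List.dedup, PySem.Set.mem_ofList] using hmem
      have hcont : R.contains (pvSheet f) = true := by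
        rw [PySem.Dict.contains_eq_decide_mem_keys, hkeys]; simpa using hmemd
      have hded2 : PySem.List.dedup ((fields ++ [f]).map pvSheet)
          = PySem.List.dedup (fields.map pvSheet) := by
        rw [hded, PySem.Set.add]
        have hc : PySem.Set.contains (PySem.List.dedup (fields.map pvSheet)) (pvSheet f) = true := by
          simp only [PySem.Set.contains]
          exact List.contains_iff_mem.mpr hmemd
        simp only [hc, if_true]
      have hgetD : R.getD (pvSheet f) pvD0 = pvInner fields (pvSheet f) := by
        apply PySem.Dict.getD_of_mem_items _ _ hnd
        rw [IH]; exact List.mem_map_of_mem hmemd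
      have hmap : ∀ g, g (pvInner fields (pvSheet f)) = pvInner (fields ++ [f]) (pvSheet f) →
          (R.modify (pvSheet f) pvD0 g).items
            = (PySem.List.dedup ((fields ++ [f]).map pvSheet)).map
                (fun s => (s, pvInner (fields ++ [f]) s)) := by
        intro g hg
        rw [PySem.Dict.modify, PySem.Dict.items_insert_of_contains _ _ hcont, hgetD, hg, IH, hded2,
            List.map_map]
        apply List.map_congr_left
        intro s _
        by_cases hs : s = pvSheet f
        · subst hs; simp
        · simp only [Function.comp]
          have : (s == pvSheet f) = false := by simp [hs]
          simp [this, pvInner_of_ne fields f s (fun hh => hs hh.symm)]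
      unfold pvStepA
      simp only [hcont, if_true]
      by_cases hm : pvReq f == "MANDATORY"
      · simp only [hm, if_true]
        exact hmap _ (pvInner_mand fields f (by simpa using hm))
      · by_cases hr : pvReq f == "RECOMMENDED"
        · simp only [hm, hr, if_true, if_false, Bool.false_eq_true]
          exact hmap _ (pvInner_rec fields f (by simpa using hr))
        · simp only [hm, hr, if_false, Bool.false_eq_true]
          exact hmap _ (pvInner_opt fields f (by simpa using hm) (by simpa using hr))
    · -- new sheet: appended at the end with empty buckets, then its bucket filled
      have hnmemd : pvSheet f ∉ PySem.List.dedup (fields.map pvSheet) := by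
        simpa [PySem.List.dedup, PySem.Set.mem_ofList] using hmem
      have hcont : R.contains (pvSheet f) = false := by
        rw [PySem.Dict.contains_eq_decide_mem_keys, hkeys]; simpa using hnmemd
      have hded2 : PySem.List.dedup ((fields ++ [f]).map pvSheet)
          = PySem.List.dedup (fields.map pvSheet) ++ [pvSheet f] := by
        rw [hded, PySem.Set.add]
        have hc : PySem.Set.contains (PySem.List.dedup (fields.map pvSheet)) (pvSheet f) = false := by
          simp only [PySem.Set.contains]
          rw [Bool.eq_false_iff]
          intro hcc
          exact hnmemd (List.contains_iff_mem.mp hcc)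
        simp only [hc, Bool.false_eq_true, if_false]
      set R' := R.insert (pvSheet f) pvD0 with hR'
      have hcont' : R'.contains (pvSheet f) = true := PySem.Dict.contains_insert_self _ _ _
      have hitems' : R'.items = R.items ++ [(pvSheet f, pvD0)] :=
        PySem.Dict.items_insert_of_not_contains _ _ hcont
      have hgetD' : R'.getD (pvSheet f) pvD0 = pvD0 := by
        rw [hR', PySem.Dict.getD_insert_self]
      have hd0 : pvD0 = pvInner fields (pvSheet f) := (pvInner_empty fields _ hmem).symm
      have hmap : ∀ g, g (pvInner fields (pvSheet f)) = pvInner (fields ++ [f]) (pvSheet f) →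
          (R'.modify (pvSheet f) pvD0 g).items
            = (PySem.List.dedup ((fields ++ [f]).map pvSheet)).map
                (fun s => (s, pvInner (fields ++ [f]) s)) := by
        intro g hg
        rw [PySem.Dict.modify, PySem.Dict.items_insert_of_contains _ _ hcont', hgetD', hd0, hg,
            hitems', hded2, IH, List.map_append, List.map_append, List.map_map]
        congr 1
        · apply List.map_congr_left
          intro s hsd
          have hs : s ≠ pvSheet f := fun hh => hnmemd (hh ▸ hsd)
          have : (s == pvSheet f) = false := by simp [hs]
          simp only [Function.comp]
          simp [this, pvInner_of_ne fields f s (fun hh => hs hh.symm)]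
        · simp
      unfold pvStepA
      simp only [hcont, if_false, Bool.false_eq_true]
      by_cases hm : pvReq f == "MANDATORY"
      · simp only [hm, if_true]
        exact hmap _ (pvInner_mand fields f (by simpa using hm))
      · by_cases hr : pvReq f == "RECOMMENDED"
        · simp only [hm, hr, if_true, if_false, Bool.false_eq_true]
          exact hmap _ (pvInner_rec fields f (by simpa using hr))
        · simp only [hm, hr, if_false, Bool.false_eq_true]
          exact hmap _ (pvInner_opt fields f (by simpa using hm) (by simpa using hr))

-- ===== VERDICT (by name: the statement is the Claim_ definition above) =====
theorem get_fields_by_sheet_and_requirement_spec : Claim_equal_get_fields_by_sheet_and_requirement := by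
  intro fields _
  unfold Spec_get_fields_by_sheet_and_requirement
  unfold get_fields_by_sheet_and_requirement get_fields_by_sheet_and_requirement_alt
  rw [pvMain, List.map_map]
  rfl
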